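-- pv_equiv track=rewrite | github.com/kpercyro/MSE-433---Module-3-Warehousing | arkhan/sof_solver.py | _pick_item
-- ===== SOURCE A (Python) =====
-- from typing import Dict, List, Optional, Tuple
--
-- def _pick_item(
--     counts: Dict[int, int],
--     active: List[Optional[int]],
--     apos: List[int],
--     queues: List[List[int]],
--     rem: List[Dict[int, int]],
-- ) -> Optional[int]:
--     cands = [i for i, q in counts.items() if q > 0]
--     if not cands:
--         return None
--     best, best_r = None, None
--     nb = len(queues)
--     for item in cands:
--         r = None
--         for b in range(nb):
--             o = active[b]
--             if o is not None and rem[o].get(item, 0) > 0: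
--                 r = (0, b, -rem[o][item], item)
--                 break
--         if r is None:
--             fb = None
--             for b in range(nb):
--                 sp = 0 if apos[b] < 0 else apos[b] + 1
--                 for p in range(sp, len(queues[b])):
--                     if rem[queues[b][p]].get(item, 0) > 0:
--                         d = p - apos[b] if apos[b] >= 0 else p + 1
--                         c = (d, b)
--                         if fb is None or c < fb:
--                             fb = c
--                         break
--             r = (1, fb[0], fb[1], item) if fb else (2, 0, 0, item)
--         if best_r is None or r < best_r:
--             best_r, best = r, item
--     return best
-- ===== SOURCE B (Python) =====
-- from typing import Dict, List, Optional
--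
--
-- def _pick_item(
--     counts: Dict[int, int],
--     active: List[Optional[int]],
--     apos: List[int],
--     queues: List[List[int]],
--     rem: List[Dict[int, int]],
-- ) -> Optional[int]:
--     cands = [i for i, q in counts.items() if q > 0]
--     if not cands:
--         return None
--     nb = len(queues)
--     # index 1: item -> (first bay whose active order still needs it, remaining qty there)
--     act_idx = {}
--     for b in range(nb):
--         o = active[b]
--         if o is None:
--             continue
--         for it, q in rem[o].items():
--             if q > 0 and it not in act_idx:
--                 act_idx[it] = (b, q)
--     # index 2: item -> lexicographically smallest (distance, bay) over all queued orders
--     fb_idx = {}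
--     for b in range(nb):
--         a = apos[b]
--         sp = 0 if a < 0 else a + 1
--         bay = {}
--         for p in range(sp, len(queues[b])):
--             for it, q in rem[queues[b][p]].items():
--                 if q > 0 and it not in bay:
--                     bay[it] = p - a if a >= 0 else p + 1
--         for it, d in bay.items():
--             cur = fb_idx.get(it)
--             if cur is None or (d, b) < cur:
--                 fb_idx[it] = (d, b)
--     best, best_r = None, None
--     for item in cands:
--         hit = act_idx.get(item)
--         if hit is not None:
--             r = (0, hit[0], -hit[1], item)
--         else:
--             fb = fb_idx.get(item)
--             r = (1, fb[0], fb[1], item) if fb is not None else (2, 0, 0, item)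
--         if best_r is None or r < best_r:
--             best_r, best = r, item
--     return best
-- ===== Notes on version B (the rewrite author's own statement) =====
-- stated objective: faster
-- what changed: Instead of rescanning every bay's active order and every queue for each candidate item (A), B makes one pass over the bays/queues building two item-keyed indexes (first active bay with remaining qty, and minimal (distance, bay) pair) and then computes each candidate's priority tuple by O(1) dictionary lookups.
import Mathlib
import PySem

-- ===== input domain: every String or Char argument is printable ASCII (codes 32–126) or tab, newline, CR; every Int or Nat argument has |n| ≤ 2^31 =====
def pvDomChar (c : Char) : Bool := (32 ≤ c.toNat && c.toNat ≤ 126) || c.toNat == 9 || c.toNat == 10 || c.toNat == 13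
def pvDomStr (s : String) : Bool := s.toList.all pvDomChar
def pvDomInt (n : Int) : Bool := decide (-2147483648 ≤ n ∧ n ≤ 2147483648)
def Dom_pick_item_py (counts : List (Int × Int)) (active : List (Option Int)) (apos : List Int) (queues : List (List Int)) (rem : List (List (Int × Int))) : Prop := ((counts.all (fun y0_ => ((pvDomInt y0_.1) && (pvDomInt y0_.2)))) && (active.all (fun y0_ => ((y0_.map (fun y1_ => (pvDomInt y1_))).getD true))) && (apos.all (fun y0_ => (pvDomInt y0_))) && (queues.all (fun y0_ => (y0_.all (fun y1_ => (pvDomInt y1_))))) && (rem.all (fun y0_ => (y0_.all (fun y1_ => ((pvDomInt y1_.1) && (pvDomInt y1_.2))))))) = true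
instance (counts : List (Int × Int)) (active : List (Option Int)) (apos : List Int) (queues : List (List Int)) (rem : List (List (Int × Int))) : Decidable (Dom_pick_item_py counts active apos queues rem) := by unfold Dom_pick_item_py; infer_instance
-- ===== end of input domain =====

-- B builds item→best-(bay/queue-distance) indexes in one pass over bays and queues, then does
-- O(1) lookups per candidate, instead of A's rescan of all bays and queues for every candidate.

-- ===== PORT A =====
-- shared small helpers: Python's tuple '<' on 2- and 4-tuples of ints (both Pythons use builtin <)
def pvLt2 (x y : Int × Int) : Bool :=
  x.1 < y.1 || (x.1 == y.1 && x.2 < y.2)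

def pvLt4 (x y : Int × Int × Int × Int) : Bool :=
  x.1 < y.1 || (x.1 == y.1 &&
    (x.2.1 < y.2.1 || (x.2.1 == y.2.1 &&
      (x.2.2.1 < y.2.2.1 || (x.2.2.1 == y.2.2.1 && x.2.2.2 < y.2.2.2)))))

-- rem[o]: exact under Pre_ (which puts o in range); the default is never reached inside Pre_
def pvRemAt (remD : List (PySem.Dict Int Int)) (o : Int) : PySem.Dict Int Int :=
  PySem.List.pyGetD remD o PySem.Dict.empty

-- the final selection loop, shared code of both Pythons ('if best_r is None or r < best_r')
def pvSelStep (r : Int → Int × Int × Int × Int)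
    (st : Option Int × Option (Int × Int × Int × Int)) (item : Int) :
    Option Int × Option (Int × Int × Int × Int) :=
  match st.2 with
  | none => (some item, some (r item))
  | some br => if pvLt4 (r item) br then (some item, some (r item)) else st

-- A's first inner loop: first bay whose active order still needs `item` (break = return)
def pvA_act (remD : List (PySem.Dict Int Int)) (active : List (Option Int)) (item : Int) :
    List Int → Option (Int × Int × Int × Int)
  | [] => none
  | b :: bs =>
    match PySem.List.pyGetD active b none with
    | some o =>
      if (pvRemAt remD o).getD item 0 > 0 then
        some (0, b, -((pvRemAt remD o).getD item 0), item)   -- rem[o][item] = getD: key present here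
      else pvA_act remD active item bs
    | none => pvA_act remD active item bs

-- A's innermost loop over queue positions: first p whose order still needs `item` (break)
def pvA_firstP (remD : List (PySem.Dict Int Int)) (qb : List Int) (item : Int) :
    List Int → Option Int
  | [] => none
  | p :: ps =>
    if (pvRemAt remD (PySem.List.pyGetD qb p 0)).getD item 0 > 0 then some p
    else pvA_firstP remD qb item ps

-- the body of A's fallback loop over bays
def pvA_fbStep (remD : List (PySem.Dict Int Int)) (apos : List Int) (queues : List (List Int))
    (item : Int) (fb : Option (Int × Int)) (b : Int) : Option (Int × Int) :=
  let a := PySem.List.pyGetD apos b 0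
  let qb := PySem.List.pyGetD queues b []
  let sp : Int := if a < 0 then 0 else a + 1
  match pvA_firstP remD qb item (PySem.List.pyRange sp (qb.length : Int) 1) with
  | none => fb
  | some p =>
    let d := if a ≥ 0 then p - a else p + 1
    match fb with
    | none => some (d, b)
    | some cur => if pvLt2 (d, b) cur then some (d, b) else fb

def pvA_fb (remD : List (PySem.Dict Int Int)) (apos : List Int) (queues : List (List Int))
    (item : Int) (bs : List Int) : Option (Int × Int) :=
  bs.foldl (pvA_fbStep remD apos queues item) none

-- A's per-item priority tuple r
def pvA_r (remD : List (PySem.Dict Int Int)) (active : List (Option Int)) (apos : List Int)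
    (queues : List (List Int)) (nb : Int) (item : Int) : Int × Int × Int × Int :=
  match pvA_act remD active item (PySem.List.pyRange 0 nb 1) with
  | some r => r
  | none =>
    match pvA_fb remD apos queues item (PySem.List.pyRange 0 nb 1) with
    | some fb => (1, fb.1, fb.2, item)
    | none => (2, 0, 0, item)

def pick_item_py (counts : List (Int × Int)) (active : List (Option Int)) (apos : List Int) (queues : List (List Int)) (rem : List (List (Int × Int))) : Option Int :=
  let countsD := PySem.Dict.ofList counts
  let remD := rem.map PySem.Dict.ofList
  let cands := (countsD.items.filter (fun p => decide (p.2 > 0))).map Prod.fst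
  if cands.isEmpty then none
  else
    let nb : Int := queues.length
    (cands.foldl (pvSelStep (pvA_r remD active apos queues nb))
      ((none, none) : Option Int × Option (Int × Int × Int × Int))).1

-- ===== PORT B =====
-- 'for it, q in src.items(): if q > 0 and it not in d: d[it] = val(q)'
def pvB_scanDict {ν : Type} (d : PySem.Dict Int ν) (src : PySem.Dict Int Int) (val : Int → ν) :
    PySem.Dict Int ν :=
  src.items.foldl
    (fun d p => if p.2 > 0 && !(d.contains p.1) then d.insert p.1 (val p.2) else d) d

-- B's first index: item -> (first bay whose active order needs it, qty there)
def pvB_act (remD : List (PySem.Dict Int Int)) (active : List (Option Int)) (bs : List Int) :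
    PySem.Dict Int (Int × Int) :=
  bs.foldl (fun d b =>
    match PySem.List.pyGetD active b none with
    | none => d
    | some o => pvB_scanDict d (pvRemAt remD o) (fun q => (b, q))) PySem.Dict.empty

-- per-bay dict: item -> distance of the first queue position that needs it
def pvB_bay (remD : List (PySem.Dict Int Int)) (qb : List Int) (a : Int) (ps : List Int) :
    PySem.Dict Int Int :=
  ps.foldl (fun d p =>
    pvB_scanDict d (pvRemAt remD (PySem.List.pyGetD qb p 0))
      (fun _ => if a ≥ 0 then p - a else p + 1)) PySem.Dict.empty

-- 'if cur is None or (d, b) < cur: fb_idx[it] = (d, b)'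
def pvB_mergeStep (b : Int) (d : PySem.Dict Int (Int × Int)) (p : Int × Int) :
    PySem.Dict Int (Int × Int) :=
  match d.get? p.1 with
  | none => d.insert p.1 (p.2, b)
  | some cur => if pvLt2 (p.2, b) cur then d.insert p.1 (p.2, b) else d

-- B's second index: item -> lexicographically smallest (distance, bay)
def pvB_fb (remD : List (PySem.Dict Int Int)) (apos : List Int) (queues : List (List Int))
    (bs : List Int) : PySem.Dict Int (Int × Int) :=
  bs.foldl (fun d b =>
    let a := PySem.List.pyGetD apos b 0
    let qb := PySem.List.pyGetD queues b []
    let sp : Int := if a < 0 then 0 else a + 1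
    let bay := pvB_bay remD qb a (PySem.List.pyRange sp (qb.length : Int) 1)
    bay.items.foldl (pvB_mergeStep b) d)
    PySem.Dict.empty

-- B's per-item priority tuple r, by two O(1) lookups
def pvB_r (actIdx fbIdx : PySem.Dict Int (Int × Int)) (item : Int) : Int × Int × Int × Int :=
  match actIdx.get? item with
  | some hit => (0, hit.1, -hit.2, item)
  | none =>
    match fbIdx.get? item with
    | some fb => (1, fb.1, fb.2, item)
    | none => (2, 0, 0, item)

def pick_item_py_alt (counts : List (Int × Int)) (active : List (Option Int)) (apos : List Int) (queues : List (List Int)) (rem : List (List (Int × Int))) : Option Int :=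
  let countsD := PySem.Dict.ofList counts
  let remD := rem.map PySem.Dict.ofList
  let cands := (countsD.items.filter (fun p => decide (p.2 > 0))).map Prod.fst
  if cands.isEmpty then none
  else
    let nb : Int := queues.length
    let actIdx := pvB_act remD active (PySem.List.pyRange 0 nb 1)
    let fbIdx := pvB_fb remD apos queues (PySem.List.pyRange 0 nb 1)
    (cands.foldl (pvSelStep (pvB_r actIdx fbIdx))
      ((none, none) : Option Int × Option (Int × Int × Int × Int))).1

-- ===== PRECONDITION & SPEC =====
-- Pre_ excludes exactly the inputs where Python A raises an IndexError: when a positive count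
-- exists A walks the bays and queues, so active/apos must cover the bays and every active order
-- and queued order id must be a valid (possibly negative, Python-style) index into rem.
-- (Mild stated narrowing: A can also return when an invalid index sits after an early break or
-- after a duplicate counts key zeroes a candidate; such shielded invalid entries are excluded too.)
def Pre_pick_item_py (counts : List (Int × Int)) (active : List (Option Int)) (apos : List Int) (queues : List (List Int)) (rem : List (List (Int × Int))) : Prop :=
  (counts.any (fun p => p.2 > 0)) = true →
    (queues.length ≤ active.length ∧ queues.length ≤ apos.length ∧
     (∀ e ∈ active.take queues.length, ∀ o, e = some o → PySem.Raise.InRange rem.length o) ∧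
     (∀ q ∈ queues, ∀ x ∈ q, PySem.Raise.InRange rem.length x))
instance (counts : List (Int × Int)) (active : List (Option Int)) (apos : List Int) (queues : List (List Int)) (rem : List (List (Int × Int))) : Decidable (Pre_pick_item_py counts active apos queues rem) := by unfold Pre_pick_item_py; infer_instance

def pvWitness_pick_item_py : (List (Int × Int)) × List (Option Int) × List Int × List (List Int) × (List (List (Int × Int))) :=
  ([(1, 1)], [none], [0], [[0]], [[(1, 1)]])

def Spec_pick_item_py (counts : List (Int × Int)) (active : List (Option Int)) (apos : List Int) (queues : List (List Int)) (rem : List (List (Int × Int))) (out : Option Int) : Prop := out = pick_item_py_alt counts active apos queues rem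
instance (counts : List (Int × Int)) (active : List (Option Int)) (apos : List Int) (queues : List (List Int)) (rem : List (List (Int × Int))) (out : Option Int) : Decidable (Spec_pick_item_py counts active apos queues rem out) := by unfold Spec_pick_item_py; infer_instance

-- ===== CLAIM (what is proved, stated in full; the proofs are below) =====
def Claim_equal_pick_item_py : Prop := ∀ (counts : List (Int × Int)) (active : List (Option Int)) (apos : List Int) (queues : List (List Int)) (rem : List (List (Int × Int))), Dom_pick_item_py counts active apos queues rem → Pre_pick_item_py counts active apos queues rem → Spec_pick_item_py counts active apos queues rem (pick_item_py counts active apos queues rem)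

-- ===== LEMMAS AND PROOFS =====

theorem pvWitness_ok :
    Dom_pick_item_py pvWitness_pick_item_py.1 pvWitness_pick_item_py.2.1
      pvWitness_pick_item_py.2.2.1 pvWitness_pick_item_py.2.2.2.1 pvWitness_pick_item_py.2.2.2.2 ∧
    Pre_pick_item_py pvWitness_pick_item_py.1 pvWitness_pick_item_py.2.1
      pvWitness_pick_item_py.2.2.1 pvWitness_pick_item_py.2.2.2.1 pvWitness_pick_item_py.2.2.2.2 := by
  constructor <;> decide

-- rem[o] always has duplicate-free keys (it is a Python dict, or the unused default)
theorem pvRemAt_nodup (rem : List (List (Int × Int))) (o : Int) :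
    (pvRemAt (rem.map PySem.Dict.ofList) o).keys.Nodup := by
  unfold pvRemAt PySem.List.pyGetD
  cases h : PySem.List.pyGet? (rem.map PySem.Dict.ofList) o with
  | none => simp [PySem.Dict.empty, PySem.Dict.keys_mk]
  | some d =>
    simp only [Option.getD_some]
    obtain ⟨l, -, rfl⟩ := List.mem_map.mp (PySem.List.mem_of_pyGet?_eq_some _ h)
    exact PySem.Dict.nodup_keys_ofList l

-- the first positive binding of k in a duplicate-free pair list, as a first-binding fact
theorem pvFind?_pos (l : List (Int × Int)) (k : Int) (h : (l.map Prod.fst).Nodup) :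
    l.find? (fun p => p.1 == k && decide (p.2 > 0)) =
      if ((l.find? (fun p => p.1 == k)).map (fun p => p.2)).getD 0 > 0 then
        some (k, ((l.find? (fun p => p.1 == k)).map (fun p => p.2)).getD 0)
      else none := by
  induction l with
  | nil => simp
  | cons p rest ih =>
    obtain ⟨a, v⟩ := p
    simp only [List.map_cons, List.nodup_cons] at h
    obtain ⟨ha, hrest⟩ := h
    by_cases hk : a = k
    · subst hk
      by_cases hv : v > 0
      · simp [hv]
      · have hnone : rest.find? (fun p => p.1 == a && decide (p.2 > 0)) = none := by
          rw [List.find?_eq_none]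
          intro x hx hc
          have hx1 : x.1 = a := by
            have := (Bool.and_eq_true _ _).mp hc |>.1
            exact beq_iff_eq.mp this
          exact ha (List.mem_map.mpr ⟨x, hx, hx1⟩)
        simp [hv, hnone]
    · have hne : (a == k) = false := by simp [hk]
      simp [hne, ih hrest]

-- lookup through an insert-if-absent-and-positive pass
theorem pvScan_aux {ν : Type} (val : Int → ν) (k : Int) :
    ∀ (l : List (Int × Int)) (d : PySem.Dict Int ν),
      (l.foldl (fun d p => if p.2 > 0 && !(d.contains p.1) then d.insert p.1 (val p.2) else d)
        d).get? k =
      match d.get? k with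
      | some v => some v
      | none => (l.find? (fun p => p.1 == k && decide (p.2 > 0))).map (fun p => val p.2) := by
  intro l
  induction l with
  | nil => intro d; cases h : d.get? k <;> simp [h]
  | cons p rest ih =>
    intro d
    obtain ⟨a, v⟩ := p
    simp only [List.foldl_cons, List.find?_cons]
    by_cases hv : v > 0
    · by_cases hc : d.contains a = true
      · rw [if_neg (by simp [hv, hc])]
        rw [ih d]
        by_cases hak : k = a
        · subst hak
          have hs : (d.get? k).isSome := by
            rw [← PySem.Dict.contains_eq_isSome_get?]; exact hc
          obtain ⟨w, hw⟩ := Option.isSome_iff_exists.mp hs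
          simp [hw]
        · have hne : (a == k) = false := by
            rw [beq_eq_false_iff_ne]; exact fun h => hak h.symm
          simp [hne]
      · rw [if_pos (by simp [hv, hc])]
        rw [ih]
        by_cases hak : k = a
        · subst hak
          have hd : d.get? k = none := by
            cases hg : d.get? k with
            | none => rfl
            | some w =>
              exact absurd (by rw [PySem.Dict.contains_eq_isSome_get?, hg]; rfl) hc
          simp [PySem.Dict.get?_insert_self, hd, hv]
        · have hne : (a == k) = false := by
            rw [beq_eq_false_iff_ne]; exact fun h => hak h.symm
          rw [PySem.Dict.get?_insert_of_ne _ _ hak]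
          simp [hne]
    · rw [if_neg (by simp [hv])]
      rw [ih d]
      have hne : ((a == k) && decide (v > 0)) = false := by simp [hv]
      simp [hne]

theorem pvB_scanDict_get? {ν : Type} (d : PySem.Dict Int ν) (src : PySem.Dict Int Int)
    (val : Int → ν) (k : Int) (h : src.keys.Nodup) :
    (pvB_scanDict d src val).get? k =
      match d.get? k with
      | some v => some v
      | none => if src.getD k 0 > 0 then some (val (src.getD k 0)) else none := by
  unfold pvB_scanDict
  rw [pvScan_aux]
  have hnd : (src.items.map Prod.fst).Nodup := by
    obtain ⟨l⟩ := src
    simpa [PySem.Dict.keys_mk] using h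
  rw [pvFind?_pos _ _ hnd]
  have hg : (src.items.find? (fun p => p.1 == k)).map (fun p => p.2) = src.get? k := rfl
  rw [hg]
  have hgd : src.getD k 0 = (src.get? k).getD 0 := PySem.Dict.getD_eq_get?_getD src k 0
  cases hd : d.get? k with
  | some v => rfl
  | none =>
    rw [hgd]
    by_cases hp : (src.get? k).getD 0 > 0 <;> simp [hp]

theorem pvScan_nodup {ν : Type} (val : Int → ν) :
    ∀ (l : List (Int × Int)) (d : PySem.Dict Int ν), d.keys.Nodup →
      ((l.foldl (fun d p => if p.2 > 0 && !(d.contains p.1) then d.insert p.1 (val p.2) else d)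
        d)).keys.Nodup := by
  intro l
  induction l with
  | nil => intro d h; simpa using h
  | cons p rest ih =>
    intro d h
    simp only [List.foldl_cons]
    by_cases hc : (p.2 > 0 && !(d.contains p.1)) = true
    · rw [if_pos hc]
      exact ih _ (PySem.Dict.nodup_keys_insert _ _ _ h)
    · rw [if_neg hc]
      exact ih _ h

-- B's active index looked up at `item` is A's first-bay scan
theorem pvAct_aux (remD : List (PySem.Dict Int Int)) (active : List (Option Int)) (item : Int)
    (hnd : ∀ o, (pvRemAt remD o).keys.Nodup) :
    ∀ (bs : List Int) (d : PySem.Dict Int (Int × Int)),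
      (bs.foldl (fun d b =>
        match PySem.List.pyGetD active b none with
        | none => d
        | some o => pvB_scanDict d (pvRemAt remD o) (fun q => (b, q))) d).get? item =
      match d.get? item with
      | some v => some v
      | none =>
        match pvA_act remD active item bs with
        | some r => some (r.2.1, -r.2.2.1)
        | none => none := by
  intro bs
  induction bs with
  | nil => intro d; cases h : d.get? item <;> simp [pvA_act, h]
  | cons b bs ih =>
    intro d
    simp only [List.foldl_cons]
    cases hab : PySem.List.pyGetD active b none with
    | none =>
      rw [ih]
      simp [pvA_act, hab]
    | some o =>
      rw [ih]
      rw [pvB_scanDict_get? _ _ _ _ (hnd o)]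
      by_cases hg : (pvRemAt remD o).getD item 0 > 0 <;>
        cases hd : d.get? item <;> simp [pvA_act, hab, hg]

-- A's first-bay scan always returns a tuple of the shape (0, _, _, item)
theorem pvAct_shape (remD : List (PySem.Dict Int Int)) (active : List (Option Int)) (item : Int) :
    ∀ (bs : List Int) (r : Int × Int × Int × Int),
      pvA_act remD active item bs = some r → r.1 = 0 ∧ r.2.2.2 = item := by
  intro bs
  induction bs with
  | nil => intro r h; simp [pvA_act] at h
  | cons b bs ih =>
    intro r h
    cases hab : PySem.List.pyGetD active b none with
    | none =>
      simp only [pvA_act, hab] at h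
      exact ih r h
    | some o =>
      simp only [pvA_act, hab] at h
      split_ifs at h with hg
      · injection h with h'
        subst h'
        exact ⟨rfl, rfl⟩
      · exact ih r h

-- B's per-bay dict looked up at `item` is A's first-position scan
theorem pvBay_aux (remD : List (PySem.Dict Int Int)) (qb : List Int) (a : Int) (item : Int)
    (hnd : ∀ o, (pvRemAt remD o).keys.Nodup) :
    ∀ (ps : List Int) (d : PySem.Dict Int Int),
      (ps.foldl (fun d p =>
        pvB_scanDict d (pvRemAt remD (PySem.List.pyGetD qb p 0))
          (fun _ => if a ≥ 0 then p - a else p + 1)) d).get? item =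
      match d.get? item with
      | some v => some v
      | none =>
        (pvA_firstP remD qb item ps).map (fun p => if a ≥ 0 then p - a else p + 1) := by
  intro ps
  induction ps with
  | nil => intro d; cases h : d.get? item <;> simp [pvA_firstP, h]
  | cons p ps ih =>
    intro d
    simp only [List.foldl_cons]
    rw [ih, pvB_scanDict_get? _ _ _ _ (hnd _)]
    by_cases hg : (pvRemAt remD (PySem.List.pyGetD qb p 0)).getD item 0 > 0 <;>
      cases hd : d.get? item <;> simp [pvA_firstP, hg]

theorem pvBay_nodup (remD : List (PySem.Dict Int Int)) (qb : List Int) (a : Int)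
    (ps : List Int) : (pvB_bay remD qb a ps).keys.Nodup := by
  unfold pvB_bay
  have : ∀ (ps' : List Int) (d : PySem.Dict Int Int), d.keys.Nodup →
      ((ps'.foldl (fun d p =>
        pvB_scanDict d (pvRemAt remD (PySem.List.pyGetD qb p 0))
          (fun _ => if a ≥ 0 then p - a else p + 1)) d)).keys.Nodup := by
    intro ps'
    induction ps' with
    | nil => intro d h; simpa using h
    | cons p ps' ih =>
      intro d h
      simp only [List.foldl_cons]
      exact ih _ (by
        unfold pvB_scanDict
        exact pvScan_nodup (fun _ => if a ≥ 0 then p - a else p + 1)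
          (pvRemAt remD (PySem.List.pyGetD qb p 0)).items d h)
  exact this ps PySem.Dict.empty (by simp [PySem.Dict.empty, PySem.Dict.keys_mk])

theorem pvMerge_untouched (b : Int) (k : Int) :
    ∀ (l : List (Int × Int)) (d : PySem.Dict Int (Int × Int)), (∀ p ∈ l, p.1 ≠ k) →
      (l.foldl (pvB_mergeStep b) d).get? k = d.get? k := by
  intro l
  induction l with
  | nil => intro d _; rfl
  | cons p rest ih =>
    intro d h
    simp only [List.foldl_cons]
    rw [ih _ (fun q hq => h q (List.mem_cons_of_mem _ hq))]
    have hp : k ≠ p.1 := fun he => (h p (by simp)) he.symm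
    unfold pvB_mergeStep
    cases hcur : d.get? p.1 with
    | none => exact PySem.Dict.get?_insert_of_ne _ _ hp
    | some cur =>
      dsimp only
      by_cases hlt : pvLt2 (p.2, b) cur = true
      · rw [if_pos hlt]; exact PySem.Dict.get?_insert_of_ne _ _ hp
      · rw [if_neg hlt]

-- the min-merge of one bay dict, observed at key k
theorem pvMerge_get? (b : Int) (k : Int) :
    ∀ (l : List (Int × Int)), (l.map Prod.fst).Nodup →
    ∀ (d : PySem.Dict Int (Int × Int)),
      (l.foldl (pvB_mergeStep b) d).get? k =
      match (l.find? (fun p => p.1 == k)).map (fun p => p.2) with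
      | none => d.get? k
      | some w =>
        match d.get? k with
        | none => some (w, b)
        | some cur => if pvLt2 (w, b) cur then some (w, b) else some cur := by
  intro l
  induction l with
  | nil => intro _ d; rfl
  | cons p rest ih =>
    intro hnd d
    obtain ⟨a, v⟩ := p
    simp only [List.map_cons, List.nodup_cons] at hnd
    simp only [List.foldl_cons, List.find?_cons]
    by_cases hak : a = k
    · subst hak
      have hrest : ∀ q ∈ rest, q.1 ≠ a := fun q hq h' =>
        hnd.1 (List.mem_map.mpr ⟨q, hq, h'⟩)
      rw [pvMerge_untouched b a rest _ hrest]
      unfold pvB_mergeStep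
      cases hd : d.get? a with
      | none => simp [PySem.Dict.get?_insert_self]
      | some cur =>
        dsimp only
        by_cases hlt : pvLt2 (v, b) cur = true
        · simp [hlt, PySem.Dict.get?_insert_self]
        · simp [hlt, hd]
    · have hne : (a == k) = false := by simp [hak]
      have haux : (pvB_mergeStep b d (a, v)).get? k = d.get? k := by
        have hka : k ≠ a := fun he => hak he.symm
        unfold pvB_mergeStep
        cases hcur : d.get? (a, v).1 with
        | none => exact PySem.Dict.get?_insert_of_ne _ _ hka
        | some cur =>
          dsimp only
          by_cases hlt : pvLt2 (v, b) cur = true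
          · rw [if_pos hlt]; exact PySem.Dict.get?_insert_of_ne _ _ hka
          · rw [if_neg hlt]
      rw [ih hnd.2]
      simp only [hne]
      cases (rest.find? (fun p => p.1 == k)).map (fun p => p.2) <;> rw [haux]

-- B's fallback index looked up at `item` runs A's fallback fold
theorem pvFb_aux (remD : List (PySem.Dict Int Int)) (apos : List Int) (queues : List (List Int))
    (item : Int) (hnd : ∀ o, (pvRemAt remD o).keys.Nodup) :
    ∀ (bs : List Int) (d : PySem.Dict Int (Int × Int)) (fb : Option (Int × Int)),
      d.get? item = fb →
      (bs.foldl (fun d b =>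
        let a := PySem.List.pyGetD apos b 0
        let qb := PySem.List.pyGetD queues b []
        let sp : Int := if a < 0 then 0 else a + 1
        let bay := pvB_bay remD qb a (PySem.List.pyRange sp (qb.length : Int) 1)
        bay.items.foldl (pvB_mergeStep b) d) d).get? item =
      bs.foldl (pvA_fbStep remD apos queues item) fb := by
  intro bs
  induction bs with
  | nil => intro d fb h; simpa using h
  | cons b bs ih =>
    intro d fb h
    simp only [List.foldl_cons]
    apply ih
    set a := PySem.List.pyGetD apos b 0 with ha
    set qb := PySem.List.pyGetD queues b [] with hqb
    set sp : Int := if a < 0 then 0 else a + 1 with hsp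
    set bay := pvB_bay remD qb a (PySem.List.pyRange sp (qb.length : Int) 1) with hbay
    have hbnd : (bay.items.map Prod.fst).Nodup := by
      have := pvBay_nodup remD qb a (PySem.List.pyRange sp (qb.length : Int) 1)
      rw [← hbay] at this
      obtain ⟨l⟩ := bay
      simpa [PySem.Dict.keys_mk] using this
    rw [pvMerge_get? b item bay.items hbnd d]
    have hbg : (bay.items.find? (fun p => p.1 == item)).map (fun p => p.2) = bay.get? item := rfl
    have hlook : bay.get? item =
        (pvA_firstP remD qb item (PySem.List.pyRange sp (qb.length : Int) 1)).map
          (fun p => if a ≥ 0 then p - a else p + 1) := by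
      rw [hbay]
      unfold pvB_bay
      rw [pvBay_aux remD qb a item hnd]
      simp [PySem.Dict.get?_empty]
    rw [hbg, hlook]
    unfold pvA_fbStep
    simp only [← ha, ← hqb, ← hsp]
    cases pvA_firstP remD qb item (PySem.List.pyRange sp (qb.length : Int) 1) with
    | none => simpa using h
    | some p =>
      simp only [Option.map_some]
      rw [h]
      cases fb with
      | none => rfl
      | some cur => rfl

-- the two per-item priority tuples agree
theorem pvR_eq (remD : List (PySem.Dict Int Int)) (active : List (Option Int)) (apos : List Int)
    (queues : List (List Int)) (nb : Int) (item : Int)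
    (hnd : ∀ o, (pvRemAt remD o).keys.Nodup) :
    pvA_r remD active apos queues nb item =
      pvB_r (pvB_act remD active (PySem.List.pyRange 0 nb 1))
        (pvB_fb remD apos queues (PySem.List.pyRange 0 nb 1)) item := by
  unfold pvB_r pvB_act pvB_fb pvA_r
  rw [pvAct_aux remD active item hnd]
  simp only [PySem.Dict.get?_empty]
  cases hA : pvA_act remD active item (PySem.List.pyRange 0 nb 1) with
  | some r =>
    obtain ⟨hr1, hr4⟩ := pvAct_shape remD active item _ r hA
    obtain ⟨r1, r2, r3, r4⟩ := r
    simp only at hr1 hr4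
    subst hr1; subst hr4
    simp
  | none =>
    rw [pvFb_aux remD apos queues item hnd _ PySem.Dict.empty none (PySem.Dict.get?_empty _)]
    unfold pvA_fb
    cases hf : List.foldl (pvA_fbStep remD apos queues item) none (PySem.List.pyRange 0 nb 1) <;>
      simp

theorem pvMain_eq (counts : List (Int × Int)) (active : List (Option Int)) (apos : List Int)
    (queues : List (List Int)) (rem : List (List (Int × Int))) :
    pick_item_py counts active apos queues rem = pick_item_py_alt counts active apos queues rem := by
  unfold pick_item_py pick_item_py_alt
  dsimp only
  rw [show pvA_r (rem.map PySem.Dict.ofList) active apos queues (queues.length : Int)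
        = pvB_r (pvB_act (rem.map PySem.Dict.ofList) active
            (PySem.List.pyRange 0 (queues.length : Int) 1))
          (pvB_fb (rem.map PySem.Dict.ofList) apos queues
            (PySem.List.pyRange 0 (queues.length : Int) 1)) from
    funext (fun item => pvR_eq _ active apos queues _ item (fun o => pvRemAt_nodup rem o))]

-- ===== VERDICT (by name: the statement is the Claim_ definition above) =====
theorem pick_item_py_spec : Claim_equal_pick_item_py := by
  intro counts active apos queues rem _ _
  exact pvMain_eq counts active apos queues rem
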